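-- pv_equiv track=rewrite | github.com/aranya-code/PracticeQuestionsDSA | SameFrequency.py | check_same_frequency
-- ===== SOURCE A (Python) =====
-- def check_same_frequency(list1, list2):
--
--     if len(list1) != len(list2):
--         return False
--
--     frequency1 = {}
--     frequency2 = {}
--
--     for item in list1:
--         frequency1[item] = frequency1.get(item, 0) +1
--
--     for item in list2:
--         frequency2[item] = frequency2.get(item, 0) +1
--
--     return frequency1 == frequency2
-- ===== SOURCE B (Python) =====
-- def check_same_frequency(list1, list2):
--     return sorted(list1) == sorted(list2)
-- ===== Notes on version B (the rewrite author's own statement) =====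
-- stated objective: simpler
-- what changed: B sorts both lists and compares them for equality (same multiset iff equal sorted sequences), replacing A's length check plus two hash frequency tables compared for equality.
import Mathlib
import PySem

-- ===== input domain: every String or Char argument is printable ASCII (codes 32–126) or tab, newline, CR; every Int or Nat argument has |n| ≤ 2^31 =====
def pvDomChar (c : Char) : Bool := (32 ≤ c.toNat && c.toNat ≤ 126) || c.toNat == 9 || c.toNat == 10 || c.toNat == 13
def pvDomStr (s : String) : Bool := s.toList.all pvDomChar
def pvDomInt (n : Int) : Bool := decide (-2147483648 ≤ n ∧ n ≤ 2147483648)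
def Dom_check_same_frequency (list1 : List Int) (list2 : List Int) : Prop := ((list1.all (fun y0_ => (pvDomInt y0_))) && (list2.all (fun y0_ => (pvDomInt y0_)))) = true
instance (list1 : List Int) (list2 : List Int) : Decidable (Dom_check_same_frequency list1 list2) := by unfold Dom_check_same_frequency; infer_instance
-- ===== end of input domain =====

-- B sorts both lists and compares the sorted sequences, instead of A's length check plus
-- two frequency dicts compared for equality.


-- ===== PORT A =====
-- Python's `dict == dict` is order-independent map equality (keys as a set, values by lookup);
-- PySem.Dict `=` compares insertion order too, so `==` is ported as mutual lookup agreement.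
def pyDictEq (d1 d2 : PySem.Dict Int Int) : Bool :=
  d1.keys.all (fun k => d2.get? k == d1.get? k) && d2.keys.all (fun k => d1.get? k == d2.get? k)

def check_same_frequency (list1 : List Int) (list2 : List Int) : Bool :=
  if list1.length ≠ list2.length then false
  else
    let frequency1 := list1.foldl (fun d item => d.insert item (d.getD item 0 + 1)) (PySem.Dict.empty : PySem.Dict Int Int)
    let frequency2 := list2.foldl (fun d item => d.insert item (d.getD item 0 + 1)) (PySem.Dict.empty : PySem.Dict Int Int)
    pyDictEq frequency1 frequency2

-- ===== PORT B =====
def check_same_frequency_alt (list1 : List Int) (list2 : List Int) : Bool :=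
  PySem.List.sorted list1 (fun x => x) false == PySem.List.sorted list2 (fun x => x) false

-- ===== PRECONDITION & SPEC =====
def Spec_check_same_frequency (list1 : List Int) (list2 : List Int) (out : Bool) : Prop := out = check_same_frequency_alt list1 list2
instance (list1 : List Int) (list2 : List Int) (out : Bool) : Decidable (Spec_check_same_frequency list1 list2 out) := by unfold Spec_check_same_frequency; infer_instance

-- ===== CLAIM =====
def Claim_equal_check_same_frequency : Prop := ∀ (list1 : List Int) (list2 : List Int), Dom_check_same_frequency list1 list2 → Spec_check_same_frequency list1 list2 (check_same_frequency list1 list2)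

-- ===== LEMMAS AND PROOFS =====

theorem get?_eq_ite (d : PySem.Dict Int Int) (k : Int) :
    d.get? k = if d.contains k then some (d.getD k 0) else none := by
  rw [PySem.Dict.contains_eq_isSome_get?, PySem.Dict.getD_eq_get?_getD]
  cases d.get? k <;> simp

-- lookup in the counter dict built by A's loops
theorem counter_get? (l : List Int) (v : Int) :
    (l.foldl (fun d item => d.insert item (d.getD item 0 + 1)) (PySem.Dict.empty : PySem.Dict Int Int)).get? v =
      if v ∈ l then some (l.count v : Int) else none := by
  rw [get?_eq_ite, PySem.Dict.foldl_insert_getD_add_one_eq_counter, PySem.Dict.contains_counter]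
  have hg := PySem.Dict.getD_foldl_insert_add_one l (PySem.Dict.empty : PySem.Dict Int Int) v
  simp only [PySem.Dict.getD_empty, zero_add, PySem.Dict.foldl_insert_getD_add_one_eq_counter] at hg
  rw [hg]
  by_cases h : v ∈ l <;> simp [h]

theorem counter_mem_keys (l : List Int) (v : Int) :
    v ∈ (l.foldl (fun d item => d.insert item (d.getD item 0 + 1)) (PySem.Dict.empty : PySem.Dict Int Int)).keys ↔ v ∈ l := by
  rw [PySem.Dict.foldl_insert_getD_add_one_eq_counter, PySem.Dict.keys_counter, PySem.Set.mem_ofList]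

-- A = true ↔ equal lengths and every element has equal counts
theorem checkA_iff (l1 l2 : List Int) :
    check_same_frequency l1 l2 = true ↔ l1.length = l2.length ∧ ∀ v, l1.count v = l2.count v := by
  unfold check_same_frequency pyDictEq
  split_ifs with hlen
  · simp only [false_iff, not_and]
    intro h; exact absurd h hlen
  · push Not at hlen
    simp only [Bool.and_eq_true, List.all_eq_true, beq_iff_eq]
    constructor
    · rintro ⟨h1, h2⟩
      refine ⟨hlen, fun v => ?_⟩
      by_cases hv1 : v ∈ l1
      · have := h1 v ((counter_mem_keys l1 v).mpr hv1)
        rw [counter_get?, counter_get?, if_pos hv1] at this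
        by_cases hv2 : v ∈ l2
        · rw [if_pos hv2] at this
          exact_mod_cast (Option.some_inj.mp this).symm
        · rw [if_neg hv2] at this
          exact absurd this (by simp)
      · by_cases hv2 : v ∈ l2
        · have := h2 v ((counter_mem_keys l2 v).mpr hv2)
          rw [counter_get?, counter_get?, if_pos hv2, if_neg hv1] at this
          exact absurd this (by simp)
        · rw [List.count_eq_zero_of_not_mem hv1, List.count_eq_zero_of_not_mem hv2]
    · rintro ⟨-, hcnt⟩
      constructor <;> intro k _ <;> rw [counter_get?, counter_get?, hcnt k] <;>
        by_cases h : k ∈ l1 <;> by_cases h' : k ∈ l2 <;>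
          simp_all [List.count_eq_zero_of_not_mem, ← List.count_pos_iff]

-- B = true ↔ the lists are permutations of each other
theorem checkB_iff (l1 l2 : List Int) :
    check_same_frequency_alt l1 l2 = true ↔ l1.Perm l2 := by
  unfold check_same_frequency_alt
  rw [beq_iff_eq, PySem.List.sorted_id_eq_sorted_id_iff_perm]

-- ===== VERDICT =====
theorem check_same_frequency_spec : Claim_equal_check_same_frequency := by
  intro l1 l2 _
  unfold Spec_check_same_frequency
  rw [Bool.eq_iff_iff, checkA_iff, checkB_iff, List.perm_iff_count]
  constructor
  · rintro ⟨-, h⟩; exact h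
  · intro h
    exact ⟨List.Perm.length_eq ((List.perm_iff_count).mpr h), h⟩
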